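-- pv_equiv track=rewrite | github.com/EvgeniyAzarov/flow-matching-editing | models/unet_cond.py | _cal_channels
-- ===== SOURCE A (Python) =====
-- def _cal_channels(base_dim, dim_mults):
--     dims = [base_dim * mult for mult in dim_mults]
--     dims.insert(0, base_dim)
--     channels_down = []
--     for i in range(len(dims) - 1):
--         channels_down.append((dims[i], dims[i + 1]))
--     channels_up = []
--     for i in range(1, len(dims)):
--         channels_up.append((dims[-i], dims[-(i + 1)]))
--     return channels_down, channels_up
-- ===== SOURCE B (Python) =====
-- def _cal_channels(base_dim, dim_mults):
--     # One fused pass: no intermediate dims list and no second scan.  Carry the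
--     # previous dim; emit the forward pair and the swapped pair together, then
--     # reverse the swapped accumulator once at the end.
--     channels_down = []
--     up_rev = []
--     prev = base_dim
--     for m in dim_mults:
--         cur = base_dim * m
--         channels_down.append((prev, cur))
--         up_rev.append((cur, prev))
--         prev = cur
--     return channels_down, up_rev[::-1]
-- ===== Notes on version B (the rewrite author's own statement) =====
-- stated objective: alternative
-- what changed: Replaces A's two index loops over a materialized dims list with one fused pass over dim_mults that carries the previous dim and emits both the forward pair and the swapped pair per step (channels_up obtained by one final reverse), so no dims list and no second scan exist.
import Mathlib
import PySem

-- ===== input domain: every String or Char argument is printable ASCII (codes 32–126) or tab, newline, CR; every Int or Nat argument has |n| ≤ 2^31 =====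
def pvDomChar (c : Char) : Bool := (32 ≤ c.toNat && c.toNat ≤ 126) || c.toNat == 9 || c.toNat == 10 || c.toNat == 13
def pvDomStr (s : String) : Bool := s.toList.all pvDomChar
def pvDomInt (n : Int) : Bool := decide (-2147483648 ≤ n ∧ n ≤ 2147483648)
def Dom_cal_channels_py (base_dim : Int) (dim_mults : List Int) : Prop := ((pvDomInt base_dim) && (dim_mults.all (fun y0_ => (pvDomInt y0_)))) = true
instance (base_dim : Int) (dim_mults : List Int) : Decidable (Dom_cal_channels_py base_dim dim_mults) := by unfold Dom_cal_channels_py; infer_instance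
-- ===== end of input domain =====

-- B replaces A's two index loops over a materialized dims list with one fused pass over
-- dim_mults emitting both the forward and the swapped pair per step (one final reverse).

-- ===== PORT A =====
def cal_channels_py (base_dim : Int) (dim_mults : List Int) : (List (Int × Int)) × (List (Int × Int)) :=
  -- dims = [base_dim * mult for mult in dim_mults]; dims.insert(0, base_dim)
  let dims : List Int := base_dim :: dim_mults.map (fun mult => base_dim * mult)
  -- for i in range(len(dims) - 1): channels_down.append((dims[i], dims[i+1]))
  -- indices are always in range here, so pyGetD is exact
  let channels_down :=
    (PySem.List.pyRange 0 ((dims.length : Int) - 1) 1).foldl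
      (fun acc i => acc ++ [(PySem.List.pyGetD dims i 0, PySem.List.pyGetD dims (i + 1) 0)]) []
  -- for i in range(1, len(dims)): channels_up.append((dims[-i], dims[-(i+1)]))
  let channels_up :=
    (PySem.List.pyRange 1 (dims.length : Int) 1).foldl
      (fun acc i => acc ++ [(PySem.List.pyGetD dims (-i) 0, PySem.List.pyGetD dims (-(i + 1)) 0)]) []
  (channels_down, channels_up)

-- ===== PORT B =====
-- one fused loop over dim_mults carrying (channels_down, up_rev, prev); final reverse
def cal_channels_py_alt (base_dim : Int) (dim_mults : List Int) : (List (Int × Int)) × (List (Int × Int)) :=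
  let s := dim_mults.foldl
    (fun (s : (List (Int × Int)) × (List (Int × Int)) × Int) m =>
      let cur := base_dim * m
      (s.1 ++ [(s.2.2, cur)], s.2.1 ++ [(cur, s.2.2)], cur))
    ([], [], base_dim)
  (s.1, s.2.1.reverse)

-- ===== PRECONDITION & SPEC =====
def Spec_cal_channels_py (base_dim : Int) (dim_mults : List Int) (out : (List (Int × Int)) × (List (Int × Int))) : Prop := out = cal_channels_py_alt base_dim dim_mults
instance (base_dim : Int) (dim_mults : List Int) (out : (List (Int × Int)) × (List (Int × Int))) : Decidable (Spec_cal_channels_py base_dim dim_mults out) := by unfold Spec_cal_channels_py; infer_instance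

-- ===== CLAIM (what is proved, stated in full; the proofs are below) =====
def Claim_equal_cal_channels_py : Prop := ∀ (base_dim : Int) (dim_mults : List Int), Dom_cal_channels_py base_dim dim_mults → Spec_cal_channels_py base_dim dim_mults (cal_channels_py base_dim dim_mults)

-- ===== LEMMAS AND PROOFS =====

-- A's first loop over indices equals zipping l with its tail (for any list l).
theorem down_loop_eq_zip (l : List Int) :
    (PySem.List.pyRange 0 ((l.length : Int) - 1) 1).foldl
      (fun acc i => acc ++ [(PySem.List.pyGetD l i 0, PySem.List.pyGetD l (i + 1) 0)]) []
    = l.zip l.tail := by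
  rw [PySem.List.foldl_append_singleton_eq_map, PySem.List.pyRange_one]
  have hlen : (((l.length : Int) - 1 - 0).toNat) = l.length - 1 := by omega
  rw [hlen]
  apply List.ext_getElem
  · simp [List.length_zip]
  · intro k h1 h2
    have hk : k < l.length - 1 := by simpa using h1
    simp only [List.nil_append, List.getElem_map, List.getElem_range, List.getElem_zip,
      List.getElem_tail, Prod.mk.injEq]
    refine ⟨?_, ?_⟩
    · rw [show ((0:Int) + k) = ((k : Nat) : Int) by ring,
        PySem.List.pyGetD_natCast, List.getD_eq_getElem]
    · rw [show ((0:Int) + k + 1) = (((k+1 : Nat)) : Int) by push_cast; ring,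
        PySem.List.pyGetD_natCast, List.getD_eq_getElem]

-- A's second loop (negative indices) equals the reversed-and-swapped first pairing.
theorem up_loop_eq_reverse_swap (l : List Int) :
    (PySem.List.pyRange 1 (l.length : Int) 1).foldl
      (fun acc i => acc ++ [(PySem.List.pyGetD l (-i) 0, PySem.List.pyGetD l (-(i + 1)) 0)]) []
    = (l.zip l.tail).reverse.map (fun p => (p.2, p.1)) := by
  rw [PySem.List.foldl_append_singleton_eq_map, PySem.List.pyRange_one]
  have hlen : (((l.length : Int) - 1).toNat) = l.length - 1 := by omega
  rw [hlen]
  apply List.ext_getElem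
  · simp [List.length_zip]
  · intro k h1 h2
    have hk : k < l.length - 1 := by simpa using h1
    simp only [List.nil_append, List.getElem_map, List.getElem_range, List.getElem_reverse,
      List.getElem_zip, List.getElem_tail, List.length_zip, List.length_tail, Prod.mk.injEq]
    refine ⟨?_, ?_⟩
    · rw [show (-((1:Int) + k)) = -(((k+1 : Nat)) : Int) by push_cast; ring,
        PySem.List.pyGetD_neg_natCast _ _ _ (by omega) (by omega)]
      congr 1
      simp
      omega
    · rw [show (-((1:Int) + k + 1)) = -(((k+2 : Nat)) : Int) by push_cast; ring,
        PySem.List.pyGetD_neg_natCast _ _ _ (by omega) (by omega)]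
      congr 1
      simp
      omega

-- B's fused loop computes the zip pairing and its swapped copy (forward order).
theorem alt_loop_eq (base_dim : Int) (mults : List Int) : ∀ (prev : Int) (d u : List (Int × Int)),
    mults.foldl
      (fun (s : (List (Int × Int)) × (List (Int × Int)) × Int) m =>
        let cur := base_dim * m
        (s.1 ++ [(s.2.2, cur)], s.2.1 ++ [(cur, s.2.2)], cur))
      (d, u, prev)
    = (d ++ (prev :: mults.map (fun m => base_dim * m)).zip (mults.map (fun m => base_dim * m)),
       u ++ ((prev :: mults.map (fun m => base_dim * m)).zip (mults.map (fun m => base_dim * m))).map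
         (fun p => (p.2, p.1)),
       (prev :: mults.map (fun m => base_dim * m)).getLast (List.cons_ne_nil _ _)) := by
  induction mults with
  | nil => intro prev d u; simp
  | cons m rest ih =>
    intro prev d u
    simp only [List.foldl_cons, ih (base_dim * m), List.map_cons, List.zip_cons_cons,
      List.map_cons, List.append_assoc, List.cons_append, List.nil_append, Prod.mk.injEq]
    refine ⟨trivial, trivial, ?_⟩
    rw [List.getLast_cons (List.cons_ne_nil _ _)]

-- ===== VERDICT (by name: the statement is the Claim_ definition above) =====
theorem cal_channels_py_spec : Claim_equal_cal_channels_py := by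
  intro base_dim dim_mults _
  show cal_channels_py base_dim dim_mults = cal_channels_py_alt base_dim dim_mults
  unfold cal_channels_py cal_channels_py_alt
  simp only
  rw [down_loop_eq_zip, up_loop_eq_reverse_swap, alt_loop_eq]
  simp [List.map_reverse]
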